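-- pv_equiv track=rewrite | github.com/Nikolas2001-13/Universidad | Nikolas_ECI_182/PIMB-2/W82.py | rec
-- ===== SOURCE A (Python) =====
-- def rec(n,c):
--     if c==0:
--         return
--     else:
--         if n[c]>=n[c-1]:
--             return n[c]
--         else:
--             return rec(n,c-1)
-- ===== SOURCE B (Python) =====
-- def rec(n, c):
--     for i in range(c, 0, -1):
--         if n[i] >= n[i-1]:
--             return n[i]
--     return None
-- ===== Notes on version B (the rewrite author's own statement) =====
-- stated objective: idiomatic
-- what changed: The descending recursion is replaced by a for-loop over range(c, 0, -1) that returns the first element >= its predecessor, with an empty range (hence None) for negative c instead of Python's negative-index wraparound.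
-- intended difference: For negative c (inside Pre_, where a qualifying pair exists in wraparound range), A wraps around via Python negative indexing and returns an element near the end of the list, while B's empty range returns None; None is the intended value since c is meant as a scan start index and there is nothing to scan below 0. — e.g. on rec([1, 2], -1): A returns some 2, B returns none
import Mathlib
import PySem

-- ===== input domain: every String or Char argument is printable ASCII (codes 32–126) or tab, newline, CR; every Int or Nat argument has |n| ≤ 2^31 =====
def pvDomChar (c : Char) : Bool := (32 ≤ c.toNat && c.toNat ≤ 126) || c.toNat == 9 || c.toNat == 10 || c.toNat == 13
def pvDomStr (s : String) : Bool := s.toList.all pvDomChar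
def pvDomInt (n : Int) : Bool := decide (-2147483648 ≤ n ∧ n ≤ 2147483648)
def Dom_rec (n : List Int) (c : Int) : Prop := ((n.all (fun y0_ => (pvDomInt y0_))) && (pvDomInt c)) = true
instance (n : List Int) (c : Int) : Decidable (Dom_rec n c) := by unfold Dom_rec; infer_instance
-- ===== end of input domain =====

-- B replaces A's descending recursion by a for-loop over range(c, 0, -1); for negative c the
-- range is empty and B returns None where A wraps around via negative indexing (see D_rec).

-- ===== PORT A =====
def rec (n : List Int) (c : Int) : Option Int :=
  if c = 0 then none
  else
    match PySem.List.pyGet? n c, h2 : PySem.List.pyGet? n (c - 1) with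
    | some a, some b => if a ≥ b then some a else rec n (c - 1)
    | _, _ => none      -- IndexError in Python; excluded by Pre_rec
termination_by (c + n.length).natAbs
decreasing_by
  have h := (PySem.List.pyGet?_eq_none_iff (xs := n) (i := c - 1))
  have hin : PySem.Raise.InRange n.length (c - 1) := by
    by_contra hc
    rw [← h] at hc
    simp [hc] at h2
  simp only [PySem.Raise.InRange] at hin
  omega

-- ===== PORT B =====
def rec_alt (n : List Int) (c : Int) : Option Int :=
  (PySem.List.pyRange c 0 (-1)).findSome? (fun i =>
    match PySem.List.pyGet? n i with
    | none => none      -- IndexError in Python; outside Pre_rec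
    | some a =>
      match PySem.List.pyGet? n (i - 1) with
      | none => none    -- IndexError in Python; outside Pre_rec
      | some b => if a ≥ b then some a else none)

-- ===== PRECONDITION & SPEC =====
-- Pre_rec excludes exactly the inputs on which Python A raises: c out of range on the positive
-- side, or negative c whose wraparound descent runs past the front of the list (IndexError).
def Pre_rec (n : List Int) (c : Int) : Prop :=
  c = 0 ∨ (0 < c ∧ c < n.length) ∨
    (c < 0 ∧ 1 - (n.length : Int) ≤ c ∧
      ∃ i : Nat, i < n.length ∧ 1 ≤ i ∧ (i : Int) ≤ (n.length : Int) + c ∧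
        n.getD (i - 1) 0 ≤ n.getD i 0)
instance (n : List Int) (c : Int) : Decidable (Pre_rec n c) := by unfold Pre_rec; infer_instance
def pvWitness_rec : List Int × Int := ([3, 1, 2], 2)

-- For negative c (inside Pre_rec) A wraps around via Python negative indexing and returns an
-- element found near the end of the list, while B returns None; None is the intended value since
-- c is a scan start index and there is nothing to scan below index 0.
def D_rec (n : List Int) (c : Int) : Prop := c < 0
instance (n : List Int) (c : Int) : Decidable (D_rec n c) := by unfold D_rec; infer_instance

def Spec_rec (n : List Int) (c : Int) (out : Option Int) : Prop := ¬ D_rec n c → out = rec_alt n c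
instance (n : List Int) (c : Int) (out : Option Int) : Decidable (Spec_rec n c out) := by unfold Spec_rec; infer_instance

def pvDiffWitness_rec : List Int × Int := ([1, 2], -1)
def pvDiffWitnessOut_rec : (Option Int) × (Option Int) := (some 2, none)

-- ===== CLAIM (what is proved, stated in full; the proofs are below) =====
def Claim_unchanged_rec : Prop := ∀ (n : List Int) (c : Int), Dom_rec n c → Pre_rec n c → Spec_rec n c (rec n c)
def Claim_changed_rec : Prop := Dom_rec (pvDiffWitness_rec.1) (pvDiffWitness_rec.2) ∧ Pre_rec (pvDiffWitness_rec.1) (pvDiffWitness_rec.2) ∧ D_rec (pvDiffWitness_rec.1) (pvDiffWitness_rec.2) ∧ rec (pvDiffWitness_rec.1) (pvDiffWitness_rec.2) = pvDiffWitnessOut_rec.1 ∧ rec_alt (pvDiffWitness_rec.1) (pvDiffWitness_rec.2) = pvDiffWitnessOut_rec.2 ∧ pvDiffWitnessOut_rec.1 ≠ pvDiffWitnessOut_rec.2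
def Claim_exact_rec : Prop := ∀ (n : List Int) (c : Int), Dom_rec n c → Pre_rec n c → D_rec n c → rec n c ≠ rec_alt n c

-- ===== LEMMAS AND PROOFS =====

-- A and B agree on 0 ≤ k < n.length (as Pythons they scan the same pairs top-down).
lemma rec_eq_alt_nat (n : List Int) (k : Nat) (hk : (k : Int) < n.length) :
    rec n (k : Int) = rec_alt n (k : Int) := by
  induction k with
  | zero =>
    rw [rec.eq_def]
    unfold rec_alt
    rw [PySem.List.pyRange_neg_one_eq_nil (by omega)]
    simp
  | succ k ih =>
    have hk1 : k + 1 < n.length := by exact_mod_cast hk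
    have hk' : k < n.length := by omega
    have hgc : PySem.List.pyGet? n ((k + 1 : Nat) : Int) = some n[k + 1] :=
      PySem.List.pyGet?_ofNat n (k + 1) hk1
    have hstep : (((k + 1 : Nat) : Int) - 1) = ((k : Nat) : Int) := by push_cast; ring
    have hgp : PySem.List.pyGet? n (((k + 1 : Nat) : Int) - 1) = some n[k] := by
      rw [hstep]; exact PySem.List.pyGet?_ofNat n k hk'
    have hne : ((k + 1 : Nat) : Int) ≠ 0 := by push_cast; omega
    rw [rec.eq_def, if_neg hne, hgc, hgp]
    unfold rec_alt
    rw [PySem.List.pyRange_neg_one_cons (by push_cast; omega), List.findSome?_cons, hgc, hgp]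
    by_cases hab : n[k + 1] ≥ n[k]
    · simp [hab]
    · simp only [if_neg hab, hstep]
      have := ih (by omega)
      unfold rec_alt at this
      simpa using this

-- On negative c inside Pre_rec, A returns some value (by descent on the wraparound index).
lemma rec_neg_some_aux : ∀ (m : Nat) (n : List Int) (c : Int), (c + n.length).natAbs = m →
    c < 0 → 1 - (n.length : Int) ≤ c → ∀ i : Nat, i < n.length → 1 ≤ i →
    (i : Int) ≤ (n.length : Int) + c → n.getD (i - 1) 0 ≤ n.getD i 0 →
    ∃ v, rec n c = some v := by
  intro m
  induction m using Nat.strong_induction_on with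
  | _ m IH =>
  intro n c hm hc hlb i hilen hi1 hile hasc
  set k : Nat := (-c).toNat with hkdef
  have hk0 : 0 < k := by omega
  have hkle : k + 1 ≤ n.length := by omega
  have hck : c = -(k : Int) := by omega
  have hg1 : PySem.List.pyGet? n c = n[n.length - k]? := by
    rw [hck]; exact PySem.List.pyGet?_neg_natCast n k hk0 (by omega)
  have hg2 : PySem.List.pyGet? n (c - 1) = n[n.length - (k + 1)]? := by
    have : c - 1 = -((k + 1 : Nat) : Int) := by push_cast; omega
    rw [this]; exact PySem.List.pyGet?_neg_natCast n (k + 1) (by omega) hkle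
  have hj1 : n.length - k < n.length := by omega
  have hj2 : n.length - (k + 1) < n.length := by omega
  rw [List.getElem?_eq_getElem hj1] at hg1
  rw [List.getElem?_eq_getElem hj2] at hg2
  rw [rec.eq_def, if_neg (by omega : ¬ c = 0), hg1, hg2]
  by_cases hab : n[n.length - k] ≥ n[n.length - (k + 1)]
  · exact ⟨n[n.length - k], by simp [hab]⟩
  · simp only [if_neg hab]
    -- the qualifying pair lies strictly below the current position
    have hine : i ≠ n.length - k := by
      intro h
      apply hab
      have e1 : n.getD i 0 = n[n.length - k] := by rw [h]; exact List.getD_eq_getElem n 0 hj1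
      have e2 : n.getD (i - 1) 0 = n[n.length - (k + 1)] := by
        have : i - 1 = n.length - (k + 1) := by omega
        rw [this]; exact List.getD_eq_getElem n 0 hj2
      rw [e1, e2] at hasc
      exact hasc
    have hilt : (i : Int) ≤ (n.length : Int) + (c - 1) := by omega
    exact IH (c - 1 + n.length).natAbs (by omega) n (c - 1) rfl (by omega) (by omega)
      i hilen hi1 hilt hasc

lemma rec_neg_some (n : List Int) (c : Int) (hc : c < 0)
    (hlb : 1 - (n.length : Int) ≤ c)
    (hex : ∃ i : Nat, i < n.length ∧ 1 ≤ i ∧ (i : Int) ≤ (n.length : Int) + c ∧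
      n.getD (i - 1) 0 ≤ n.getD i 0) : ∃ v, rec n c = some v := by
  obtain ⟨i, hilen, hi1, hile, hasc⟩ := hex
  exact rec_neg_some_aux (c + n.length).natAbs n c rfl hc hlb i hilen hi1 hile hasc

lemma rec_alt_neg (n : List Int) (c : Int) (hc : c ≤ 0) : rec_alt n c = none := by
  unfold rec_alt
  rw [PySem.List.pyRange_neg_one_eq_nil (by omega)]
  rfl

-- ===== VERDICT (by name: the statement is the Claim_ definition above) =====
theorem rec_spec : Claim_unchanged_rec := by
  intro n c _ hpre hnd
  have hc0 : 0 ≤ c := by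
    by_contra h
    exact hnd (show D_rec n c by unfold D_rec; omega)
  rcases hpre with h0 | ⟨h1, h2⟩ | ⟨h3, _, _⟩
  · subst h0
    rw [rec.eq_def, if_pos rfl, rec_alt_neg n 0 le_rfl]
  · have : c = ((c.toNat : Nat) : Int) := by omega
    rw [this]
    exact rec_eq_alt_nat n c.toNat (by omega)
  · omega

theorem rec_changed : Claim_changed_rec := by
  unfold Claim_changed_rec
  refine ⟨by decide, by decide, by decide, ?_, ?_, by decide⟩
  · show rec [1, 2] (-1) = some 2
    rw [rec.eq_def]
    decide
  · show rec_alt [1, 2] (-1) = none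
    exact rec_alt_neg [1, 2] (-1) (by omega)

theorem rec_tight : Claim_exact_rec := by
  intro n c _ hpre hd
  have hc : c < 0 := hd
  rcases hpre with h0 | ⟨h1, _⟩ | ⟨_, hlb, hex⟩
  · omega
  · omega
  · obtain ⟨v, hv⟩ := rec_neg_some n c hc hlb hex
    rw [hv, rec_alt_neg n c (le_of_lt hc)]
    simp
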